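-- pv_equiv track=rewrite | github.com/icebeartellsnolies/leetcode | site_code/leet code/count_total_2579.py | coloredCells
-- ===== SOURCE A (Python) =====
-- def coloredCells(n):
--     count=n
--     n=1
--     i=0
--     while count>=1:
--         n=(i*4)+n
--         count-=1
--         i+=1
--     return n
-- ===== SOURCE B (Python) =====
-- def coloredCells(n):
--     if n < 1:
--         return 1
--     return 2 * n * (n - 1) + 1
-- ===== Notes on version B (the rewrite author's own statement) =====
-- stated objective: faster
-- what changed: Replaced the linear accumulation loop by a constant-time closed-form quadratic formula.
import Mathlib
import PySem

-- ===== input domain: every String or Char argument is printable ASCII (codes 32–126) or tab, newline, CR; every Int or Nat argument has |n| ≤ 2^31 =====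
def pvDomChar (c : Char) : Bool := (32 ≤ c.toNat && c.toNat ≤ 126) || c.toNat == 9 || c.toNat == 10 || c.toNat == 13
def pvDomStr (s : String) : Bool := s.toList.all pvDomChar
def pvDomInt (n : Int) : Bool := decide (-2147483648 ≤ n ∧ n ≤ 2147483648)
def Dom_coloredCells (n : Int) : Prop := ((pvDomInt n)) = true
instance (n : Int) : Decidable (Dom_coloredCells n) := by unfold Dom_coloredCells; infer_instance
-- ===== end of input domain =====

-- B replaces A's linear accumulation loop by a constant-time closed-form quadratic (objective: faster).

-- ===== PORT A =====
-- A's while loop: state (count, n, i); iterate while count >= 1.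
def coloredCellsLoop (count n i : Int) : Int :=
  if count ≥ 1 then coloredCellsLoop (count - 1) (i * 4 + n) (i + 1) else n
termination_by count.toNat
decreasing_by omega

def coloredCells (n : Int) : Int :=
  coloredCellsLoop n 1 0

-- ===== PORT B =====
def coloredCells_alt (n : Int) : Int :=
  if n < 1 then 1 else 2 * n * (n - 1) + 1

-- ===== PRECONDITION & SPEC =====
def Spec_coloredCells (n : Int) (out : Int) : Prop := out = coloredCells_alt n
instance (n : Int) (out : Int) : Decidable (Spec_coloredCells n out) := by unfold Spec_coloredCells; infer_instance

-- ===== CLAIM (what is proved, stated in full; the proofs are below) =====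
def Claim_equal_coloredCells : Prop := ∀ (n : Int), Dom_coloredCells n → Spec_coloredCells n (coloredCells n)

-- ===== LEMMAS AND PROOFS =====

-- Loop invariant: for a nonnegative count c, the loop adds 2*c*(c-1) + 4*i*c to n.
theorem coloredCellsLoop_closed (k : Nat) : ∀ (n i : Int),
    coloredCellsLoop (k : Int) n i = n + 2 * k * (k - 1) + 4 * i * k := by
  induction k with
  | zero => intro n i; rw [coloredCellsLoop]; norm_num
  | succ m ih =>
    intro n i
    rw [coloredCellsLoop]
    have h1 : ((m : Int) + 1) ≥ 1 := by omega
    have h2 : ((m : Int) + 1) - 1 = (m : Int) := by ring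
    push_cast
    rw [if_pos h1, h2, ih]
    ring

theorem coloredCellsLoop_neg (c n i : Int) (h : c < 1) : coloredCellsLoop c n i = n := by
  rw [coloredCellsLoop, if_neg (by omega)]

-- ===== VERDICT (by name: the statement is the Claim_ definition above) =====
theorem coloredCells_spec : Claim_equal_coloredCells := by
  intro n _
  unfold Spec_coloredCells coloredCells coloredCells_alt
  by_cases h : n < 1
  · rw [coloredCellsLoop_neg _ _ _ h, if_pos h]
  · obtain ⟨k, rfl⟩ := Int.eq_ofNat_of_zero_le (by omega : (0 : Int) ≤ n)
    rw [coloredCellsLoop_closed, if_neg h]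
    ring
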